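-- pv_equiv track=rewrite | github.com/YEONGINJOO/algorithm | 백준/Bronze/21207. Train Boarding/Train Boarding.py | train_boarding
-- ===== SOURCE A (Python) =====
-- def train_boarding(N, L, P, passengers):
--     # 각 차의 문 위치 계산
--     door_positions = [(i * L + L // 2) for i in range(N)]
--
--     max_distance = 0
--     car_passenger_count = [0] * N
--
--     for passenger in passengers:
--         # 각 승객이 어느 차의 문으로 가는지 계산
--         closest_car = -1
--         closest_distance = float('inf')
--
--         for i in range(N):
--             # 현재 차의 문까지의 거리 계산
--             door_position = door_positions[i]
--             distance = abs(passenger - door_position)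
--
--             # 더 가까운 차를 찾거나, 거리가 같으면 높은 번호의 차 선택
--             if distance < closest_distance or (distance == closest_distance and i > closest_car):
--                 closest_distance = distance
--                 closest_car = i
--
--         # 최대 거리 갱신
--         max_distance = max(max_distance, closest_distance)
--
--         # 해당 차의 승객 수 증가
--         car_passenger_count[closest_car] += 1
--
--     # 최대 승객 수 계산
--     max_passengers_in_car = max(car_passenger_count)
--
--     return max_distance, max_passengers_in_car
-- ===== SOURCE B (Python) =====
-- def train_boarding(N, L, P, passengers):
--     # O(P + N): the nearest door (tie -> higher car) is computed in O(1) by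
--     # rounding (p - half) / L to the nearest integer (halves round up) and clamping;
--     # with car length 0 every door coincides, so the tie-break picks the last car.
--     half = L // 2
--     counts = [0] * N
--     max_distance = 0
--     for p in passengers:
--         if L == 0:
--             i = N - 1
--         else:
--             i = (2 * (p - half) + L) // (2 * L)
--             if i < 0:
--                 i = 0
--             elif i > N - 1:
--                 i = N - 1
--         d = abs(p - (i * L + half))
--         if d > max_distance:
--             max_distance = d
--         counts[i] += 1
--     return max_distance, max(counts)
-- ===== Notes on version B (the rewrite author's own statement) =====
-- stated objective: faster
-- what changed: The O(N) inner scan over all doors per passenger is replaced by an O(1) closed-form nearest-door computation ((2*(p-L//2)+L)//(2*L), clamped to [0,N-1], last car when L=0), which rounds to the nearest evenly-spaced door with ties going to the higher-numbered car.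
import Mathlib
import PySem

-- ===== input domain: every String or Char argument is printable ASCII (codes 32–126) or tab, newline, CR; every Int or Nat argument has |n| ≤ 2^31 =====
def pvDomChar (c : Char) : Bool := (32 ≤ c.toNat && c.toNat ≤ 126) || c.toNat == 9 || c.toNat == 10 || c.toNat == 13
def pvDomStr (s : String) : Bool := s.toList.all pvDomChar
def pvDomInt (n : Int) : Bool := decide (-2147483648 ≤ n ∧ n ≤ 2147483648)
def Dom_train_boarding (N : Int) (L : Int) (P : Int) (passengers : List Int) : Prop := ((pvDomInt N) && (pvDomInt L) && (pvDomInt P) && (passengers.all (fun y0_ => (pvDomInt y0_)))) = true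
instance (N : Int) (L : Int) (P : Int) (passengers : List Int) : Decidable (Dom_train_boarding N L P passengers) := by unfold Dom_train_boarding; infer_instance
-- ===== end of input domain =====

-- B replaces A's per-passenger O(N) scan over all doors by an O(1) closed-form
-- nearest-door index (round to nearest, ties to the higher car, clamped), O(P+N) total.

-- `counts[i] += 1` for 0 ≤ i < len counts (the only case either program reaches;
-- a negative/out-of-range index raises in Python only on inputs excluded by Pre_).
def pvIncAt (counts : List Int) (i : Int) : List Int :=
  if 0 ≤ i then counts.set i.toNat (PySem.List.pyGetD counts i 0 + 1) else counts

-- ===== PORT A =====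
def train_boarding (N : Int) (L : Int) (P : Int) (passengers : List Int) : Int × Int :=
  let half := PySem.Int.floordiv L 2
  let door_positions := (PySem.List.pyRange 0 N 1).map (fun i => i * L + half)
  let st := passengers.foldl (fun (st : Int × List Int) passenger =>
    -- inner scan: closest_car starts at -1, closest_distance at float('inf') (= none)
    let inner := (PySem.List.pyRange 0 N 1).foldl (fun (cs : Int × Option Int) i =>
      let door_position := PySem.List.pyGetD door_positions i 0
      let distance := |passenger - door_position|
      match cs.2 with
      | none => (i, some distance)
      | some cd =>
        if distance < cd ∨ (distance = cd ∧ cs.1 < i) then (i, some distance) else cs)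
      ((-1 : Int), (none : Option Int))
    let md := match inner.2 with
      | some cd => max st.1 cd
      | none => st.1   -- unreachable under Pre_ (N ≥ 1)
    (md, pvIncAt st.2 inner.1)) (0, List.replicate N.toNat 0)
  (st.1, (PySem.List.max? st.2 (fun y => y)).getD 0)

-- ===== PORT B =====
def train_boarding_alt (N : Int) (L : Int) (P : Int) (passengers : List Int) : Int × Int :=
  let half := PySem.Int.floordiv L 2
  let st := passengers.foldl (fun (st : Int × List Int) p =>
    let i := if L = 0 then N - 1 else
      let i0 := PySem.Int.floordiv (2 * (p - half) + L) (2 * L)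
      if i0 < 0 then 0 else if N - 1 < i0 then N - 1 else i0
    let d := |p - (i * L + half)|
    let md := if st.1 < d then d else st.1
    (md, pvIncAt st.2 i)) (0, List.replicate N.toNat 0)
  (st.1, (PySem.List.max? st.2 (fun y => y)).getD 0)

-- ===== PRECONDITION & SPEC =====
-- A raises for N ≤ 0 (max() of / IndexError on the empty car-count list); Pre_ excludes exactly that.
def Pre_train_boarding (N : Int) (L : Int) (P : Int) (passengers : List Int) : Prop :=
  1 ≤ N
instance (N : Int) (L : Int) (P : Int) (passengers : List Int) : Decidable (Pre_train_boarding N L P passengers) := by unfold Pre_train_boarding; infer_instance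
def pvWitness_train_boarding : Int × Int × Int × List Int := (3, 4, 2, [1, 9])

def Spec_train_boarding (N : Int) (L : Int) (P : Int) (passengers : List Int) (out : Int × Int) : Prop := out = train_boarding_alt N L P passengers
instance (N : Int) (L : Int) (P : Int) (passengers : List Int) (out : Int × Int) : Decidable (Spec_train_boarding N L P passengers out) := by unfold Spec_train_boarding; infer_instance

-- ===== CLAIM (what is proved, stated in full; the proofs are below) =====
def Claim_equal_train_boarding : Prop := ∀ (N : Int) (L : Int) (P : Int) (passengers : List Int), Dom_train_boarding N L P passengers → Pre_train_boarding N L P passengers → Spec_train_boarding N L P passengers (train_boarding N L P passengers)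

-- ===== LEMMAS AND PROOFS =====

-- distance from the passenger offset c = passenger - L//2 to door i (door i sits at i*L + L//2)
def pvDst (c L i : Int) : Int := |c - i * L|
-- the index A's inner loop has selected after scanning doors 0..n-1 (q = B's unclamped index)
def pvCl (q n : Int) : Int := max 0 (min q (n - 1))

-- pure arithmetic cores (s = remainder of 2c+L by 2L, u = 2L*(q-i) with its sign recorded)
theorem pvAbs_step_le (L s u x y : Int)
    (hb : (0 < L ∧ 0 ≤ s ∧ s < 2 * L ∧ 0 ≤ u) ∨ (L < 0 ∧ 2 * L < s ∧ s ≤ 0 ∧ u ≤ 0))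
    (hx : 2 * x = u + (s - L)) (hy : 2 * y = 2 * x + 2 * L) : |x| ≤ |y| := by
  rcases abs_cases x with ⟨h1, _⟩ | ⟨h1, _⟩ <;> rcases abs_cases y with ⟨h2, _⟩ | ⟨h2, _⟩ <;> omega

theorem pvAbs_step_lt (L s u x y : Int)
    (hb : (0 < L ∧ 0 ≤ s ∧ s < 2 * L ∧ u ≤ 0) ∨ (L < 0 ∧ 2 * L < s ∧ s ≤ 0 ∧ 0 ≤ u))
    (hx : 2 * x = u + (s - L)) (hy : 2 * y = 2 * x - 2 * L) : |x| < |y| := by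
  rcases abs_cases x with ⟨h1, _⟩ | ⟨h1, _⟩ <;> rcases abs_cases y with ⟨h2, _⟩ | ⟨h2, _⟩ <;> omega

-- moving one door towards q never increases the distance
theorem pvDst_step_le (c L : Int) (hL : L ≠ 0)
    (i : Int) (hi : i ≤ PySem.Int.floordiv (2 * c + L) (2 * L)) :
    pvDst c L i ≤ pvDst c L (i - 1) := by
  have hid := PySem.Int.floordiv_mul_add_mod (2 * c + L) (2 * L)
  set q := PySem.Int.floordiv (2 * c + L) (2 * L) with hq
  set s := PySem.Int.mod (2 * c + L) (2 * L) with hs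
  have hx : 2 * (c - i * L) = 2 * L * (q - i) + (s - L) := by linear_combination -hid
  have hy : 2 * (c - (i - 1) * L) = 2 * (c - i * L) + 2 * L := by ring
  rcases lt_or_gt_of_ne hL with hneg | hpos
  · have hsb := PySem.Int.mod_neg_bounds (a := 2 * c + L) (b := 2 * L) (by omega)
    exact pvAbs_step_le L s (2 * L * (q - i)) _ _
      (Or.inr ⟨hneg, by omega, by omega, mul_nonpos_of_nonpos_of_nonneg (by omega) (by omega)⟩) hx hy
  · have hs0 := PySem.Int.mod_nonneg (a := 2 * c + L) (b := 2 * L) (by omega)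
    have hsl := PySem.Int.mod_lt (a := 2 * c + L) (b := 2 * L) (by omega)
    exact pvAbs_step_le L s (2 * L * (q - i)) _ _
      (Or.inl ⟨hpos, by omega, by omega, mul_nonneg (by omega) (by omega)⟩) hx hy

-- one door past q the distance strictly grows
theorem pvDst_step_lt (c L : Int) (hL : L ≠ 0)
    (a : Int) (ha : PySem.Int.floordiv (2 * c + L) (2 * L) ≤ a) :
    pvDst c L a < pvDst c L (a + 1) := by
  have hid := PySem.Int.floordiv_mul_add_mod (2 * c + L) (2 * L)
  set q := PySem.Int.floordiv (2 * c + L) (2 * L) with hq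
  set s := PySem.Int.mod (2 * c + L) (2 * L) with hs
  have hx : 2 * (c - a * L) = 2 * L * (q - a) + (s - L) := by linear_combination -hid
  have hy : 2 * (c - (a + 1) * L) = 2 * (c - a * L) - 2 * L := by ring
  rcases lt_or_gt_of_ne hL with hneg | hpos
  · have hsb := PySem.Int.mod_neg_bounds (a := 2 * c + L) (b := 2 * L) (by omega)
    exact pvAbs_step_lt L s (2 * L * (q - a)) _ _
      (Or.inr ⟨hneg, by omega, by omega, by nlinarith⟩) hx hy
  · have hs0 := PySem.Int.mod_nonneg (a := 2 * c + L) (b := 2 * L) (by omega)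
    have hsl := PySem.Int.mod_lt (a := 2 * c + L) (b := 2 * L) (by omega)
    exact pvAbs_step_lt L s (2 * L * (q - a)) _ _
      (Or.inl ⟨hpos, by omega, by omega, mul_nonpos_of_nonneg_of_nonpos (by omega) (by omega)⟩) hx hy

theorem pvDst_strict (c L : Int) (hL : L ≠ 0)
    (a b : Int) (ha : PySem.Int.floordiv (2 * c + L) (2 * L) ≤ a) (hab : a < b) :
    pvDst c L a < pvDst c L b := by
  obtain ⟨k, rfl⟩ : ∃ k : Nat, b = a + 1 + (k : Int) := ⟨(b - a - 1).toNat, by omega⟩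
  clear hab
  induction k with
  | zero => simpa using pvDst_step_lt c L hL a ha
  | succ k ih =>
    have hcast : a + 1 + ((k + 1 : Nat) : Int) = a + 1 + (k : Int) + 1 := by push_cast; ring
    rw [hcast]
    exact ih.trans (pvDst_step_lt c L hL (a + 1 + (k : Int)) (by omega))

theorem pv_inner_eq (N L p : Int) (hL : L ≠ 0) (k : Nat) (hk : (k : Int) < N) :
    (PySem.List.pyRange 0 ((k : Int) + 1) 1).foldl (fun (cs : Int × Option Int) i =>
      let door_position := PySem.List.pyGetD ((PySem.List.pyRange 0 N 1).map
        (fun i => i * L + PySem.Int.floordiv L 2)) i 0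
      let distance := |p - door_position|
      match cs.2 with
      | none => (i, some distance)
      | some cd =>
        if distance < cd ∨ (distance = cd ∧ cs.1 < i) then (i, some distance) else cs)
      ((-1 : Int), (none : Option Int))
    = (pvCl (PySem.Int.floordiv (2 * (p - PySem.Int.floordiv L 2) + L) (2 * L)) ((k : Int) + 1),
       some (pvDst (p - PySem.Int.floordiv L 2) L
         (pvCl (PySem.Int.floordiv (2 * (p - PySem.Int.floordiv L 2) + L) (2 * L)) ((k : Int) + 1)))) := by
  set half := PySem.Int.floordiv L 2 with hhalf
  set c := p - half with hc
  set q := PySem.Int.floordiv (2 * c + L) (2 * L) with hq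
  have hdoor : ∀ i : Int, 0 ≤ i → i < N →
      PySem.List.pyGetD ((PySem.List.pyRange 0 N 1).map
        (fun i => i * L + half)) i 0 = i * L + half := fun i h1 h2 =>
    PySem.List.pyGetD_map_pyRange_of_nonneg _ _ _ _ h1 h2
  have hdist : ∀ i : Int, |p - (i * L + half)| = pvDst c L i := by
    intro i; unfold pvDst; congr 1; rw [hc]; ring
  induction k with
  | zero =>
    have hr : PySem.List.pyRange 0 (((0 : Nat) : Int) + 1) 1 = [(0 : Int)] := by
      simpa using PySem.List.pyRange_one_singleton (a := (0 : Int))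
    rw [hr]
    simp only [List.foldl_cons, List.foldl_nil]
    have h0 : pvCl q (((0 : Nat) : Int) + 1) = 0 := by unfold pvCl; omega
    simp only [h0, hdoor 0 le_rfl (by exact_mod_cast hk), hdist 0]
  | succ k ih =>
    have hc1 : ((k + 1 : Nat) : Int) = (k : Int) + 1 := by push_cast; ring
    rw [hc1] at hk ⊢
    have hk' : (k : Int) < N := by omega
    rw [PySem.List.pyRange_one_succ_right (by omega : (0 : Int) ≤ (k : Int) + 1),
        List.foldl_append, ih hk']
    simp only [List.foldl_cons, List.foldl_nil]
    simp only [hdoor ((k : Int) + 1) (by omega) hk, hdist ((k : Int) + 1)]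
    by_cases hcase : (k : Int) + 1 ≤ q
    · have hm : pvCl q ((k : Int) + 1) = (k : Int) := by unfold pvCl; omega
      have hm2 : pvCl q ((k : Int) + 1 + 1) = (k : Int) + 1 := by unfold pvCl; omega
      have hle : pvDst c L ((k : Int) + 1) ≤ pvDst c L (k : Int) := by
        have h := pvDst_step_le c L hL ((k : Int) + 1) hcase
        have he : (k : Int) + 1 - 1 = (k : Int) := by ring
        rwa [he] at h
      rw [hm, hm2]
      rcases lt_or_eq_of_le hle with hlt | heq
      · rw [if_pos (Or.inl hlt)]
      · rw [if_pos (Or.inr ⟨heq, by omega⟩)]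
    · have hq' : q ≤ (k : Int) := by omega
      have hm : pvCl q ((k : Int) + 1) = max 0 q := by unfold pvCl; omega
      have hm2 : pvCl q ((k : Int) + 1 + 1) = max 0 q := by unfold pvCl; omega
      have hlt : pvDst c L (max 0 q) < pvDst c L ((k : Int) + 1) :=
        pvDst_strict c L hL _ _ (le_max_right 0 q) (by omega)
      rw [hm, hm2, if_neg]
      push Not
      exact ⟨by omega, fun he => absurd he (by omega)⟩


-- with car length 0 every door sits at L//2, so A's tie-break walks to the last car
theorem pv_inner_eq_zero (N L p : Int) (hL : L = 0) (k : Nat) (hk : (k : Int) < N) :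
    (PySem.List.pyRange 0 ((k : Int) + 1) 1).foldl (fun (cs : Int × Option Int) i =>
      let door_position := PySem.List.pyGetD ((PySem.List.pyRange 0 N 1).map
        (fun i => i * L + PySem.Int.floordiv L 2)) i 0
      let distance := |p - door_position|
      match cs.2 with
      | none => (i, some distance)
      | some cd =>
        if distance < cd ∨ (distance = cd ∧ cs.1 < i) then (i, some distance) else cs)
      ((-1 : Int), (none : Option Int))
    = ((k : Int), some |p - PySem.Int.floordiv L 2|) := by
  set half := PySem.Int.floordiv L 2 with hhalf
  have hdoor : ∀ i : Int, 0 ≤ i → i < N →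
      PySem.List.pyGetD ((PySem.List.pyRange 0 N 1).map
        (fun i => i * L + half)) i 0 = i * L + half := fun i h1 h2 =>
    PySem.List.pyGetD_map_pyRange_of_nonneg _ _ _ _ h1 h2
  have hdist0 : ∀ i : Int, |p - (i * L + half)| = |p - half| := by
    intro i; rw [hL]; congr 1; ring
  induction k with
  | zero =>
    have hr : PySem.List.pyRange 0 (((0 : Nat) : Int) + 1) 1 = [(0 : Int)] := by
      simpa using PySem.List.pyRange_one_singleton (a := (0 : Int))
    rw [hr]
    simp only [List.foldl_cons, List.foldl_nil]
    simp only [hdoor 0 le_rfl (by exact_mod_cast hk), hdist0 0, Nat.cast_zero]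
  | succ k ih =>
    have hc1 : ((k + 1 : Nat) : Int) = (k : Int) + 1 := by push_cast; ring
    rw [hc1] at hk ⊢
    have hk' : (k : Int) < N := by omega
    rw [PySem.List.pyRange_one_succ_right (by omega : (0 : Int) ≤ (k : Int) + 1),
        List.foldl_append, ih hk']
    simp only [List.foldl_cons, List.foldl_nil]
    simp only [hdoor ((k : Int) + 1) (by omega) hk, hdist0 ((k : Int) + 1)]
    split_ifs with hcond
    · rfl
    · simp at hcond

theorem pv_inner_eq_zero' (N L p : Int) (hN : 1 ≤ N) (hL : L = 0) :
    (PySem.List.pyRange 0 N 1).foldl (fun (cs : Int × Option Int) i =>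
      let door_position := PySem.List.pyGetD ((PySem.List.pyRange 0 N 1).map
        (fun i => i * L + PySem.Int.floordiv L 2)) i 0
      let distance := |p - door_position|
      match cs.2 with
      | none => (i, some distance)
      | some cd =>
        if distance < cd ∨ (distance = cd ∧ cs.1 < i) then (i, some distance) else cs)
      ((-1 : Int), (none : Option Int))
    = (N - 1, some |p - PySem.Int.floordiv L 2|) := by
  have hN' : ((N - 1).toNat : Int) + 1 = N := by omega
  have h := pv_inner_eq_zero N L p hL (N - 1).toNat (by omega)
  rw [hN'] at h
  have ht : ((N - 1).toNat : Int) = N - 1 := by omega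
  rw [h, ht]

theorem pv_inner_eq' (N L p : Int) (hN : 1 ≤ N) (hL : L ≠ 0) :
    (PySem.List.pyRange 0 N 1).foldl (fun (cs : Int × Option Int) i =>
      let door_position := PySem.List.pyGetD ((PySem.List.pyRange 0 N 1).map
        (fun i => i * L + PySem.Int.floordiv L 2)) i 0
      let distance := |p - door_position|
      match cs.2 with
      | none => (i, some distance)
      | some cd =>
        if distance < cd ∨ (distance = cd ∧ cs.1 < i) then (i, some distance) else cs)
      ((-1 : Int), (none : Option Int))
    = (pvCl (PySem.Int.floordiv (2 * (p - PySem.Int.floordiv L 2) + L) (2 * L)) N,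
       some (pvDst (p - PySem.Int.floordiv L 2) L
         (pvCl (PySem.Int.floordiv (2 * (p - PySem.Int.floordiv L 2) + L) (2 * L)) N))) := by
  have hN' : ((N - 1).toNat : Int) + 1 = N := by omega
  have h := pv_inner_eq N L p hL (N - 1).toNat (by omega)
  rw [hN'] at h
  exact h

-- ===== VERDICT (by name: the statement is the Claim_ definition above) =====
theorem train_boarding_spec : Claim_equal_train_boarding := by
  intro N L P passengers hDom hPre
  have hN : 1 ≤ N := hPre
  unfold Spec_train_boarding train_boarding train_boarding_alt
  simp only []
  have hstep :
      (fun (st : Int × List Int) passenger =>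
        let inner := (PySem.List.pyRange 0 N 1).foldl (fun (cs : Int × Option Int) i =>
          let door_position := PySem.List.pyGetD ((PySem.List.pyRange 0 N 1).map
            (fun i => i * L + PySem.Int.floordiv L 2)) i 0
          let distance := |passenger - door_position|
          match cs.2 with
          | none => (i, some distance)
          | some cd =>
            if distance < cd ∨ (distance = cd ∧ cs.1 < i) then (i, some distance) else cs)
          ((-1 : Int), (none : Option Int))
        let md := match inner.2 with
          | some cd => max st.1 cd
          | none => st.1
        (md, pvIncAt st.2 inner.1))
      = (fun (st : Int × List Int) p =>
        let i := if L = 0 then N - 1 else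
          let i0 := PySem.Int.floordiv (2 * (p - PySem.Int.floordiv L 2) + L) (2 * L)
          if i0 < 0 then 0 else if N - 1 < i0 then N - 1 else i0
        let d := |p - (i * L + PySem.Int.floordiv L 2)|
        let md := if st.1 < d then d else st.1
        (md, pvIncAt st.2 i)) := by
    funext st x
    by_cases hL0 : L = 0
    · simp only [pv_inner_eq_zero' N L x hN hL0, if_pos hL0]
      have habs0 : |x - ((N - 1) * L + PySem.Int.floordiv L 2)| = |x - PySem.Int.floordiv L 2| := by
        rw [hL0]; congr 1; ring
      simp only [habs0]
      have hmax : ∀ a b : Int, max a b = if a < b then b else a := by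
        intro a b; rw [max_def]; split_ifs <;> omega
      rw [hmax]
    simp only [pv_inner_eq' N L x hN hL0, if_neg hL0]
    have hi : (if PySem.Int.floordiv (2 * (x - PySem.Int.floordiv L 2) + L) (2 * L) < 0 then (0 : Int)
        else if N - 1 < PySem.Int.floordiv (2 * (x - PySem.Int.floordiv L 2) + L) (2 * L) then N - 1
        else PySem.Int.floordiv (2 * (x - PySem.Int.floordiv L 2) + L) (2 * L))
        = pvCl (PySem.Int.floordiv (2 * (x - PySem.Int.floordiv L 2) + L) (2 * L)) N := by
      unfold pvCl; split_ifs <;> omega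
    simp only [hi]
    have habs : |x - (pvCl (PySem.Int.floordiv (2 * (x - PySem.Int.floordiv L 2) + L) (2 * L)) N * L
        + PySem.Int.floordiv L 2)|
        = pvDst (x - PySem.Int.floordiv L 2) L
            (pvCl (PySem.Int.floordiv (2 * (x - PySem.Int.floordiv L 2) + L) (2 * L)) N) := by
      unfold pvDst; congr 1; ring
    simp only [habs]
    have hmax : ∀ a b : Int, max a b = if a < b then b else a := by
      intro a b; rw [max_def]; split_ifs <;> omega
    rw [hmax]
  rw [hstep]
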